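-- pv_equiv track=rewrite | github.com/ChaofanYu/Decision-Tree | modules/ID3.py | split_on_nominal
-- ===== SOURCE A (Python) =====
-- def split_on_nominal(data_set, attribute):
--     '''
--     ========================================================================================================
--     Input:  subset of data set, the index for a nominal attribute.
--     ========================================================================================================
--     Job:    Creates a dictionary of all values of the attribute.
--     ========================================================================================================
--     Output: Dictionary of all values pointing to a list of all the data with that attribute
--     ========================================================================================================
--     '''
--     # Your code here
--     results = {}
--     for data in data_set:
--         val = []
--         val.append(data[0])
--         val.append(data[1])
--         results.setdefault(data[attribute],[]).append(val);
--     #result = list(results)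
--     return results
-- ===== SOURCE B (Python) =====
-- def split_on_nominal(data_set, attribute):
--     # Two-pass grouping: collect distinct keys in first-seen order, then
--     # build each bucket by filtering the data set.
--     keys = list(dict.fromkeys(row[attribute] for row in data_set))
--     return {k: [[row[0], row[1]] for row in data_set if row[attribute] == k]
--             for k in keys}
-- ===== Notes on version B (the rewrite author's own statement) =====
-- stated objective: alternative
-- what changed: Replaces the single setdefault-accumulating dict pass by a two-pass scheme: first collect the distinct attribute values in first-seen order, then build each bucket by filtering the data set per key.
import Mathlib
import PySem

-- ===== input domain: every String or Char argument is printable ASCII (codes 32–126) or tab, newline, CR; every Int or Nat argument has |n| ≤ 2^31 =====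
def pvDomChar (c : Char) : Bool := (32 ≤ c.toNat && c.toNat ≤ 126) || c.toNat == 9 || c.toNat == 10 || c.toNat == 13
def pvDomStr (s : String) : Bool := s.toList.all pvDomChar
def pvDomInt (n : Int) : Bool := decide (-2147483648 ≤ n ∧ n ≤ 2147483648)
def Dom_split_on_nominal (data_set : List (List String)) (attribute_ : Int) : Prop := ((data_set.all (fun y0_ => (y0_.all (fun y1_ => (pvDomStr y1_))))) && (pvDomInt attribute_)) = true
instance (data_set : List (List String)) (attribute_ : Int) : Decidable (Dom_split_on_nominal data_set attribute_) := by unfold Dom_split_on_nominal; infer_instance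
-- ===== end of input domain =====

-- B replaces A's single setdefault-accumulating dict pass by a two-pass scheme
-- (distinct keys in first-seen order, then one filtering scan per key); objective: alternative.

-- ===== PORT A =====
-- one loop step: val = [data[0], data[1]]; results.setdefault(data[attribute],[]).append(val)
-- (setdefault+append is Dict.modify with default []); 'none' threads an IndexError
def splitStepA (attribute_ : Int) (acc : Option (PySem.Dict String (List (List String)))) (data : List String) : Option (PySem.Dict String (List (List String))) :=
  acc.bind fun d =>
    match PySem.List.pyGet? data 0, PySem.List.pyGet? data 1, PySem.List.pyGet? data attribute_ with
    | some a, some b, some k => some (d.modify k [] (· ++ [[a, b]]))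
    | _, _, _ => none

def split_on_nominal (data_set : List (List String)) (attribute_ : Int) : List (String × List (List String)) :=
  ((data_set.foldl (splitStepA attribute_) (some PySem.Dict.empty)).getD PySem.Dict.empty).items

-- ===== PORT B =====
def split_on_nominal_alt (data_set : List (List String)) (attribute_ : Int) : List (String × List (List String)) :=
  let keys := PySem.List.dedup (data_set.map (fun row => PySem.List.pyGetD row attribute_ ""))
  keys.map (fun k =>
    (k, (data_set.filter (fun row => PySem.List.pyGetD row attribute_ "" == k)).map
          (fun row => [PySem.List.pyGetD row 0 "", PySem.List.pyGetD row 1 ""])))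

-- ===== PRECONDITION & SPEC =====
-- Pre_ excludes exactly the inputs where A raises IndexError: a row shorter than 2
-- (data[0]/data[1]) or with the attribute index out of Python range.
def Pre_split_on_nominal (data_set : List (List String)) (attribute_ : Int) : Prop :=
  ∀ row ∈ data_set, 2 ≤ row.length ∧ PySem.Raise.InRange row.length attribute_

instance (data_set : List (List String)) (attribute_ : Int) : Decidable (Pre_split_on_nominal data_set attribute_) := by unfold Pre_split_on_nominal; infer_instance

def pvWitness_split_on_nominal : List (List String) × Int :=
  ([["a", "x"], ["b", "x"], ["a", "y"]], 1)

def Spec_split_on_nominal (data_set : List (List String)) (attribute_ : Int) (out : List (String × List (List String))) : Prop := out = split_on_nominal_alt data_set attribute_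
instance (data_set : List (List String)) (attribute_ : Int) (out : List (String × List (List String))) : Decidable (Spec_split_on_nominal data_set attribute_ out) := by unfold Spec_split_on_nominal; infer_instance

-- ===== CLAIM (what is proved, stated in full; the proofs are below) =====
def Claim_equal_split_on_nominal : Prop := ∀ (data_set : List (List String)) (attribute_ : Int), Dom_split_on_nominal data_set attribute_ → Pre_split_on_nominal data_set attribute_ → Spec_split_on_nominal data_set attribute_ (split_on_nominal data_set attribute_)

-- ===== LEMMAS AND PROOFS =====

-- key/value of a row, total forms (agree with the pyGet? forms under Pre_)
def rowKey (attribute_ : Int) (row : List String) : String := PySem.List.pyGetD row attribute_ ""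
def rowVal (row : List String) : List String := [PySem.List.pyGetD row 0 "", PySem.List.pyGetD row 1 ""]

def splitStepT (attribute_ : Int) (d : PySem.Dict String (List (List String))) (row : List String) : PySem.Dict String (List (List String)) :=
  d.modify (rowKey attribute_ row) [] (· ++ [rowVal row])

lemma pyGet?_eq_some_pyGetD {α : Type} [Inhabited α] (xs : List α) (i : Int) (d : α)
    (h : PySem.Raise.InRange xs.length i) :
    PySem.List.pyGet? xs i = some (PySem.List.pyGetD xs i d) := by
  cases hc : PySem.List.pyGet? xs i with
  | none => exact absurd h ((PySem.List.pyGet?_eq_none_iff xs i).mp hc)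
  | some a => simp [PySem.List.pyGetD, hc]

lemma inRange_of_le {n : Nat} {k : Int} (h0 : 0 ≤ k) (h : k < n) :
    PySem.Raise.InRange n k := by
  simp [PySem.Raise.InRange]; omega

lemma foldA_eq_foldT (attribute_ : Int) (l : List (List String))
    (h : ∀ row ∈ l, 2 ≤ row.length ∧ PySem.Raise.InRange row.length attribute_) :
    ∀ d, l.foldl (splitStepA attribute_) (some d) = some (l.foldl (splitStepT attribute_) d) := by
  induction l with
  | nil => intro d; rfl
  | cons row rest ih =>
    intro d
    obtain ⟨hlen, hin⟩ := h row (List.mem_cons_self ..)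
    have h0 := pyGet?_eq_some_pyGetD row 0 "" (inRange_of_le (by omega) (by omega))
    have h1 := pyGet?_eq_some_pyGetD row 1 "" (inRange_of_le (by omega) (by omega))
    have hk := pyGet?_eq_some_pyGetD row attribute_ "" hin
    simp only [List.foldl_cons, splitStepA, Option.bind_some, h0, h1, hk]
    exact ih (fun r hr => h r (List.mem_cons_of_mem _ hr)) _

lemma items_foldT (attribute_ : Int) (l : List (List String)) :
    (l.foldl (splitStepT attribute_) PySem.Dict.empty).items = split_on_nominal_alt l attribute_ := by
  have hfold : l.foldl (splitStepT attribute_) PySem.Dict.empty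
      = (l.map (fun row => (rowKey attribute_ row, rowVal row))).foldl
          (fun d p => d.modify p.1 [] (· ++ [p.2])) PySem.Dict.empty := by
    rw [List.foldl_map]
    rfl
  have hnd : (l.foldl (splitStepT attribute_) PySem.Dict.empty).keys.Nodup :=
    PySem.Dict.nodup_keys_foldl_modify_key l (rowKey attribute_) []
      (fun _ row => (· ++ [rowVal row])) _ (by simp)
  have hkeys : (l.foldl (splitStepT attribute_) PySem.Dict.empty).keys
      = PySem.List.dedup (l.map (rowKey attribute_)) := by
    have := PySem.Dict.keys_foldl_modify_key (l := l) (key := rowKey attribute_)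
      (d0 := ([] : List (List String))) (f := fun _ row => (· ++ [rowVal row]))
      (d := PySem.Dict.empty)
    simpa [PySem.Set.update_nil_left] using this
  have hgetD : ∀ k, (l.foldl (splitStepT attribute_) PySem.Dict.empty).getD k []
      = (l.filter (fun row => rowKey attribute_ row == k)).map rowVal := by
    intro k
    rw [hfold, PySem.Dict.getD_foldl_modify_append]
    simp [List.filter_map, Function.comp_def, List.map_map]
  rw [PySem.Dict.items_eq_map_keys _ hnd ([] : List (List String)), hkeys]
  unfold split_on_nominal_alt
  refine List.map_congr_left ?_
  intro k _
  rw [hgetD k]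
  rfl

-- ===== VERDICT (by name: the statement is the Claim_ definition above) =====
theorem split_on_nominal_spec : Claim_equal_split_on_nominal := by
  intro data_set attribute_ _ hpre
  unfold Spec_split_on_nominal split_on_nominal
  rw [foldA_eq_foldT attribute_ data_set hpre]
  simpa using items_foldT attribute_ data_set
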